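-- pv_equiv track=rewrite | github.com/ArMorYeenR13/SafeQRScanner | AI/AIstuff/LexicalFeature.py | get_generic_TLD
-- ===== SOURCE A (Python) =====
-- def get_generic_TLD(netloc,ccTLD):
--   # for name and pro need eligibility so unlikely
--   # edu,gov , mil , int are considered sponsered
--   # source wiki
--   TLD_to_generic = {
--     ".com": "Commercial",
--     ".org": "Organisation",
--     ".net": "Network",
--     ".int": "international",
--     ".edu": "educational",
--     ".gov": "government",
--     ".mil": "military",
--     ".biz": "business",
--     ".info": "information",
--     ".name": "(restricted) name",
--     ".pro": "(restricted) pro",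
--   }
--   if ccTLD != "Global":
--     return "Country"
--   else:
--     for TLD in TLD_to_generic:
--       if netloc.endswith(TLD):
--         return TLD_to_generic[TLD]
--   return "Unknown"
-- ===== SOURCE B (Python) =====
-- def get_generic_TLD(netloc, ccTLD):
--   TLD_to_generic = {
--     ".com": "Commercial",
--     ".org": "Organisation",
--     ".net": "Network",
--     ".int": "international",
--     ".edu": "educational",
--     ".gov": "government",
--     ".mil": "military",
--     ".biz": "business",
--     ".info": "information",
--     ".name": "(restricted) name",
--     ".pro": "(restricted) pro",
--   }
--   if ccTLD != "Global":
--     return "Country"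
--   head, sep, tail = netloc.rpartition(".")
--   return TLD_to_generic.get(sep + tail, "Unknown")
-- ===== Notes on version B (the rewrite author's own statement) =====
-- stated objective: idiomatic
-- what changed: Replaces the for-loop that tests netloc.endswith against every TLD table key by computing the final dotted component once with rpartition('.') and doing a single dict lookup with a default.
import Mathlib
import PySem

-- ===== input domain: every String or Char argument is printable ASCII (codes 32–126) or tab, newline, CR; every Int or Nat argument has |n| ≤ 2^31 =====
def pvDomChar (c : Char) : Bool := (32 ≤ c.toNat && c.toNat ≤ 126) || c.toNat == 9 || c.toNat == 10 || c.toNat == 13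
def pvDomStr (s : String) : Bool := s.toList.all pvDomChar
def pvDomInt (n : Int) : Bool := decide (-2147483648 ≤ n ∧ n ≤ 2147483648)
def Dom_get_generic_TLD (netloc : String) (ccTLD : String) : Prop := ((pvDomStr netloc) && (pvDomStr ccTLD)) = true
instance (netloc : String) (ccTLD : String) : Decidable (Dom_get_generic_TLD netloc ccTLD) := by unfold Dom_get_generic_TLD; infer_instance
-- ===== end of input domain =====

-- B replaces A's linear endswith scan over the TLD table by one rpartition-based
-- key computation and a single dict lookup (objective: idiomatic).

-- ===== PORT A =====
-- the for-loop over the dict: first key that netloc endswith wins, else fall through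
def pvLoopA : String → List (String × String) → String
  | _, [] => "Unknown"
  | n, (k, v) :: rest => if PySem.Str.endswith n k then v else pvLoopA n rest

def get_generic_TLD (netloc : String) (ccTLD : String) : String :=
  if ccTLD ≠ "Global" then "Country"
  else
    pvLoopA netloc
      [(".com", "Commercial"), (".org", "Organisation"), (".net", "Network"),
       (".int", "international"), (".edu", "educational"), (".gov", "government"),
       (".mil", "military"), (".biz", "business"), (".info", "information"),
       (".name", "(restricted) name"), (".pro", "(restricted) pro")]

-- ===== PORT B =====
def pvTLDtable : PySem.Dict String String :=
  PySem.Dict.ofList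
    [(".com", "Commercial"), (".org", "Organisation"), (".net", "Network"),
     (".int", "international"), (".edu", "educational"), (".gov", "government"),
     (".mil", "military"), (".biz", "business"), (".info", "information"),
     (".name", "(restricted) name"), (".pro", "(restricted) pro")]

-- sep + tail of netloc.rpartition('.'), ported by hand (exact): the tail of
-- rpartition is the maximal dot-free suffix (takeWhile (≠ '.') on the reverse);
-- sep is "." iff a dot occurs, and with no dot the key sep+tail is "" + "" ++ … = s itself
-- (rpartition returns ("", "", s) then).
def pvRpartKey (s : String) : String :=
  let rev := s.toList.reverse
  let t := rev.takeWhile (fun c => c != '.')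
  if t.length = rev.length then s else String.ofList ('.' :: t.reverse)

def get_generic_TLD_alt (netloc : String) (ccTLD : String) : String :=
  if ccTLD ≠ "Global" then "Country"
  else pvTLDtable.getD (pvRpartKey netloc) "Unknown"

-- ===== PRECONDITION & SPEC =====
def Spec_get_generic_TLD (netloc : String) (ccTLD : String) (out : String) : Prop := out = get_generic_TLD_alt netloc ccTLD
instance (netloc : String) (ccTLD : String) (out : String) : Decidable (Spec_get_generic_TLD netloc ccTLD out) := by unfold Spec_get_generic_TLD; infer_instance

-- ===== CLAIM (what is proved, stated in full; the proofs are below) =====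
def Claim_equal_get_generic_TLD : Prop := ∀ (netloc : String) (ccTLD : String), Dom_get_generic_TLD netloc ccTLD → Spec_get_generic_TLD netloc ccTLD (get_generic_TLD netloc ccTLD)

-- ===== LEMMAS AND PROOFS =====

-- A dot-free block r' followed by '.' is a prefix of M iff M's maximal dot-free
-- prefix is exactly r' and M is strictly longer than r'.
theorem pv_prefix_dot_iff (r' M : List Char) (hr : '.' ∉ r') :
    (r' ++ ['.']) <+: M ↔ (M.takeWhile (fun c => c != '.') = r' ∧ r'.length < M.length) := by
  induction r' generalizing M with
  | nil =>
    cases M with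
    | nil => simp
    | cons c M' =>
      by_cases hc : c = '.'
      · simp [hc, List.cons_prefix_cons]
      · constructor
        · intro h
          exact absurd ((by simpa using h : ('.' : Char) = c)).symm hc
        · rintro ⟨h1, -⟩
          rw [List.takeWhile_cons, if_pos (by simpa using hc)] at h1
          simp at h1
  | cons a r'' ih =>
    have hr2 := hr
    simp only [List.mem_cons, not_or] at hr2
    obtain ⟨ha, hr''⟩ := hr2
    cases M with
    | nil => simp
    | cons c M' =>
      by_cases hc : c = '.'
      · subst hc
        constructor
        · intro h
          obtain ⟨h1, -⟩ := List.cons_prefix_cons.mp (by simpa using h)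
          exact absurd h1.symm ha
        · rintro ⟨h1, -⟩
          rw [List.takeWhile_cons] at h1
          simp at h1
      · constructor
        · intro h
          obtain ⟨h1, h2⟩ := List.cons_prefix_cons.mp (by simpa using h)
          obtain ⟨h3, h4⟩ := (ih M' hr'').mp h2
          refine ⟨?_, by simpa using Nat.succ_lt_succ h4⟩
          rw [List.takeWhile_cons]
          simp [h1.symm, h3]
          exact fun hh => ha hh.symm
        · rintro ⟨h1, h2⟩
          rw [List.takeWhile_cons, if_pos (by simpa using hc)] at h1
          obtain ⟨h3, h4⟩ := List.cons_eq_cons.mp h1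
          have h5 : r'' ++ ['.'] <+: M' := (ih M' hr'').mpr ⟨h4, by simpa using Nat.lt_of_succ_lt_succ (by simpa using h2)⟩
          simpa using List.cons_prefix_cons.mpr ⟨h3.symm, h5⟩

-- endswith on a dot-led, otherwise dot-free suffix t is exactly equality of t
-- with the rpartition key.
theorem pv_ends_key (n t : String) (r : List Char) (ht : t.toList = '.' :: r)
    (hr : '.' ∉ r) : PySem.Str.endswith n t = (t == pvRpartKey n) := by
  have hinj : ∀ l : List Char, (t = String.ofList l) ↔ t.toList = l := by
    intro l
    constructor
    · intro h; rw [h]; exact String.toList_ofList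
    · intro h
      have := congrArg String.ofList h
      simpa using this
  rw [Bool.eq_iff_iff]
  rw [PySem.Str.endswith_eq, PySem.Chars.endswith_iff, beq_iff_eq]
  rw [ht]
  rw [← List.reverse_prefix]
  have hrev : ('.' :: r).reverse = r.reverse ++ ['.'] := by simp
  rw [hrev]
  have hr' : '.' ∉ r.reverse := by simpa using hr
  rw [pv_prefix_dot_iff _ _ hr']
  unfold pvRpartKey
  simp only []
  by_cases hnd : ((n.toList.reverse.takeWhile (fun c => c != '.')).length = n.toList.reverse.length)
  · -- no dot in n: both sides false
    rw [if_pos hnd]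
    constructor
    · rintro ⟨heq, hlt⟩
      rw [heq] at hnd
      simp at hnd hlt
      omega
    · intro h
      -- n = t would force a '.' in n, contradicting takeWhile covering all of n
      exfalso
      have hn : n.toList = '.' :: r := by rw [← h, ht]
      have : n.toList.reverse.takeWhile (fun c => c != '.') = n.toList.reverse :=
        (List.takeWhile_prefix _).eq_of_length hnd
      have hforall := List.takeWhile_eq_self_iff.mp this
      have hdot : ('.' : Char) ∈ n.toList.reverse := by rw [hn]; simp
      have := hforall _ hdot
      simp at this
  · rw [if_neg hnd]
    rw [hinj]
    rw [ht]
    constructor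
    · rintro ⟨heq, _⟩
      rw [heq]
      simp
    · intro h
      have heq : n.toList.reverse.takeWhile (fun c => c != '.') = r.reverse := by
        have h2 : r = (n.toList.reverse.takeWhile (fun c => c != '.')).reverse := by
          simpa using congrArg List.tail h
        rw [h2]; simp
      refine ⟨heq, ?_⟩
      have hle : (n.toList.reverse.takeWhile (fun c => c != '.')).length ≤ n.toList.reverse.length :=
        (List.takeWhile_prefix _).length_le
      rw [heq] at hle hnd
      simp at hle hnd ⊢
      omega

-- ===== VERDICT (by name: the statement is the Claim_ definition above) =====
theorem get_generic_TLD_spec : Claim_equal_get_generic_TLD := by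
  intro netloc ccTLD _
  unfold Spec_get_generic_TLD get_generic_TLD get_generic_TLD_alt
  by_cases hc : ccTLD = "Global"
  · subst hc
    simp only [ne_eq, not_true_eq_false, if_false]
    have e01 := pv_ends_key netloc ".com" ['c','o','m'] (by decide) (by decide)
    have e02 := pv_ends_key netloc ".org" ['o','r','g'] (by decide) (by decide)
    have e03 := pv_ends_key netloc ".net" ['n','e','t'] (by decide) (by decide)
    have e04 := pv_ends_key netloc ".int" ['i','n','t'] (by decide) (by decide)
    have e05 := pv_ends_key netloc ".edu" ['e','d','u'] (by decide) (by decide)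
    have e06 := pv_ends_key netloc ".gov" ['g','o','v'] (by decide) (by decide)
    have e07 := pv_ends_key netloc ".mil" ['m','i','l'] (by decide) (by decide)
    have e08 := pv_ends_key netloc ".biz" ['b','i','z'] (by decide) (by decide)
    have e09 := pv_ends_key netloc ".info" ['i','n','f','o'] (by decide) (by decide)
    have e10 := pv_ends_key netloc ".name" ['n','a','m','e'] (by decide) (by decide)
    have e11 := pv_ends_key netloc ".pro" ['p','r','o'] (by decide) (by decide)
    have htab : pvTLDtable = PySem.Dict.mk
      [(".com", "Commercial"), (".org", "Organisation"), (".net", "Network"),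
       (".int", "international"), (".edu", "educational"), (".gov", "government"),
       (".mil", "military"), (".biz", "business"), (".info", "information"),
       (".name", "(restricted) name"), (".pro", "(restricted) pro")] := by decide
    rw [htab]
    simp only [pvLoopA, e01, e02, e03, e04, e05, e06, e07, e08, e09, e10, e11,
      PySem.Dict.getD, PySem.Dict.get?_mk_cons]
    simp only [apply_ite (fun o : Option String => o.getD "Unknown"), Option.getD_some]
    rfl
  · simp [hc]
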